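-- pv_equiv track=rewrite | github.com/jiacheng-xu/vmf_vae_nlp | archive/genut/util/helper.py | align_original_txt
-- ===== SOURCE A (Python) =====
-- def align_ori_txt_sent(sample, seq_len):
--     lines = sample.split('<|||>')  # list, 'a b c', 'e f g'...
--     length_bag = []
--     word2sent_idx = []
--     word = []
--
--     current_sent_idx = 0
--     current_cursor = 0
--     for l in lines:
--         words = l.split(' ')
--         this_length = len(words)
--         if current_cursor + this_length <= seq_len:
--             word2sent_idx = word2sent_idx + [current_sent_idx] * this_length
--             length_bag.append(this_length)
--             word += words
--             current_cursor += this_length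
--             current_sent_idx += 1
--         else:
--             this_length = seq_len - current_cursor
--             if this_length == 0:
--                 break
--             word2sent_idx = word2sent_idx + [current_sent_idx] * this_length
--             length_bag.append(this_length)
--             word += words[:this_length]
--             break
--     while len(word) < seq_len:
--         word.append('<pad>')
--         word2sent_idx.append(word2sent_idx[-1])
--         length_bag[-1] = length_bag[-1] + 1
--     return [word, word2sent_idx, length_bag]
--
-- def align_original_txt(ori_txt, seq_len):
--     whole_words = []
--     whole_sent_idxs = []
--     length_bag = []
--     for idx in range(len(ori_txt)):
--         sample = ori_txt[idx]
--         this_word, this_sent_idx, length = align_ori_txt_sent(sample, seq_len)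
--         whole_words.append(this_word)
--         whole_sent_idxs.append(this_sent_idx)
--         length_bag.append(length)
--     return whole_words, whole_sent_idxs, length_bag
-- ===== SOURCE B (Python) =====
-- def _flat_align(sample, seq_len):
--     sents = [l.split(' ') for l in sample.split('<|||>')]
--     flat_words = [w for s in sents for w in s]
--     flat_idx = [i for i, s in enumerate(sents) for _ in s]
--     total = min(len(flat_words), seq_len)
--     word = flat_words[:total]
--     w2s = flat_idx[:total]
--     bag = []
--     acc = 0
--     for s in sents:
--         if acc + len(s) > total:
--             break
--         bag.append(len(s))
--         acc += len(s)
--     if acc < total: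
--         bag.append(total - acc)
--     pad = seq_len - len(word)
--     if pad > 0:
--         word = word + ['<pad>'] * pad
--         w2s = w2s + [w2s[-1]] * pad
--         bag[-1] = bag[-1] + pad
--     return [word, w2s, bag]
--
--
-- def align_original_txt(ori_txt, seq_len):
--     aligned = [_flat_align(sample, seq_len) for sample in ori_txt]
--     whole_words = [a[0] for a in aligned]
--     whole_sent_idxs = [a[1] for a in aligned]
--     length_bag = [a[2] for a in aligned]
--     return whole_words, whole_sent_idxs, length_bag
-- ===== Notes on version B (the rewrite author's own statement) =====
-- stated objective: alternative
-- what changed: B replaces A's break-early cursor loop over sentences by building the full flat word and sentence-index lists, truncating them to seq_len, rebuilding the length bag from prefix sums with the remainder as the last entry, and padding in one batch instead of A's one-word-at-a-time while loop.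
-- outside the precondition, e.g. on align_original_txt(['a b c'], -1): A returns ([['a', 'b']], [[]], [[-1]]), B returns ([['a', 'b']], [[0, 0]], [[]])
import Mathlib
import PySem

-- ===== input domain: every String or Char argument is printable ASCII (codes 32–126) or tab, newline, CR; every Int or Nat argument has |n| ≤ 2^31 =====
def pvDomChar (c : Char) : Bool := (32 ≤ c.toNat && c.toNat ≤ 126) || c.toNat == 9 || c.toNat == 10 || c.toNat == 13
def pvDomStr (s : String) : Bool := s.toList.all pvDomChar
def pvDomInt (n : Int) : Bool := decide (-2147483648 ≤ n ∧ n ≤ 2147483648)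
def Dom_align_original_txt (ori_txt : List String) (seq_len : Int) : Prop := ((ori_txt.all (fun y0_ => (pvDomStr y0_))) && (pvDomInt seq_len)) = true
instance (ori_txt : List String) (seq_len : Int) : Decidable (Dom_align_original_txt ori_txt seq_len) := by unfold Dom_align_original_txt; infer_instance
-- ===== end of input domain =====

-- B replaces A's break-early cursor loop by building the full flat word/index lists, truncating
-- them to seq_len, rebuilding the length bag from prefix sums, and padding in one batch (objective:
-- alternative decomposition, same asymptotic cost).

-- ===== PORT A =====
-- the 'for l in lines' loop of align_ori_txt_sent (state: length_bag, word2sent_idx, word, idx, cursor)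
def alignSentLoop (seq_len : Int) (lines : List String) (length_bag word2sent_idx : List Int)
    (word : List String) (current_sent_idx current_cursor : Int) :
    List Int × List Int × List String :=
  match lines with
  | [] => (length_bag, word2sent_idx, word)
  | l :: rest =>
    let words := (PySem.Str.split? l " ").getD []
    let this_length : Int := (words.length : Int)
    if current_cursor + this_length ≤ seq_len then
      alignSentLoop seq_len rest (length_bag ++ [this_length])
        (word2sent_idx ++ PySem.List.pyRepeat [current_sent_idx] this_length)
        (word ++ words) (current_sent_idx + 1) (current_cursor + this_length)
    else
      let t : Int := seq_len - current_cursor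
      if t = 0 then (length_bag, word2sent_idx, word)
      else (length_bag ++ [t],
            word2sent_idx ++ PySem.List.pyRepeat [current_sent_idx] t,
            word ++ PySem.List.slice words none (some t))

-- the 'while len(word) < seq_len' padding loop; Python's word2sent_idx[-1] / length_bag[-1]
-- are pyGet? at -1 (none = IndexError; Python raises there, the port stops)
def alignPadLoop (seq_len : Int) (word : List String) (word2sent_idx length_bag : List Int) :
    List String × List Int × List Int :=
  if _h : (word.length : Int) < seq_len then
    match PySem.List.pyGet? word2sent_idx (-1), PySem.List.pyGet? length_bag (-1) with
    | some x, some b =>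
        alignPadLoop seq_len (word ++ ["<pad>"]) (word2sent_idx ++ [x])
          (length_bag.dropLast ++ [b + 1])
    | _, _ => (word, word2sent_idx, length_bag)
  else (word, word2sent_idx, length_bag)
termination_by (seq_len - word.length).toNat
decreasing_by simp only [List.length_append, List.length_cons, List.length_nil]; omega

def align_ori_txt_sent (sample : String) (seq_len : Int) : List String × List Int × List Int :=
  let lines := (PySem.Str.split? sample "<|||>").getD []
  match alignSentLoop seq_len lines [] [] [] 0 0 with
  | (length_bag, word2sent_idx, word) => alignPadLoop seq_len word word2sent_idx length_bag

def alignOuter (ori_txt : List String) (seq_len : Int) (whole_words : List (List String))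
    (whole_sent_idxs length_bag : List (List Int)) :
    List (List String) × List (List Int) × List (List Int) :=
  match ori_txt with
  | [] => (whole_words, whole_sent_idxs, length_bag)
  | sample :: rest =>
    match align_ori_txt_sent sample seq_len with
    | (w, i, l) => alignOuter rest seq_len (whole_words ++ [w]) (whole_sent_idxs ++ [i]) (length_bag ++ [l])

def align_original_txt (ori_txt : List String) (seq_len : Int) :
    List (List String) × List (List Int) × List (List Int) :=
  alignOuter ori_txt seq_len [] [] []

-- ===== PORT B =====
-- B's truncated-prefix loop over full sentences (break when a sentence does not fit)
def bagLoopB (total : Int) (sents : List (List String)) (bag : List Int) (acc : Int) :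
    List Int × Int :=
  match sents with
  | [] => (bag, acc)
  | s :: rest =>
    if acc + (s.length : Int) > total then (bag, acc)
    else bagLoopB total rest (bag ++ [(s.length : Int)]) (acc + (s.length : Int))

-- B's 'if pad > 0' batch padding (w2s[-1] / bag[-1] are pyGet? at -1; none = IndexError)
def flatPad (seq_len : Int) (word : List String) (w2s bag : List Int) :
    List String × List Int × List Int :=
  let pad := seq_len - (word.length : Int)
  if 0 < pad then
    match PySem.List.pyGet? w2s (-1), PySem.List.pyGet? bag (-1) with
    | some x, some b =>
        (word ++ PySem.List.pyRepeat ["<pad>"] pad, w2s ++ PySem.List.pyRepeat [x] pad,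
         bag.dropLast ++ [b + pad])
    | _, _ => (word, w2s, bag)
  else (word, w2s, bag)

def flatAlign (sample : String) (seq_len : Int) : List String × List Int × List Int :=
  let sents := ((PySem.Str.split? sample "<|||>").getD []).map
    (fun l => (PySem.Str.split? l " ").getD [])
  let flat_words := sents.flatten
  let flat_idx := (PySem.List.enumerate sents).flatMap (fun p => List.replicate p.2.length p.1)
  let total : Int := min (flat_words.length : Int) seq_len
  let word := PySem.List.slice flat_words none (some total)
  let w2s := PySem.List.slice flat_idx none (some total)
  match bagLoopB total sents [] 0 with
  | (bag0, acc) =>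
    let bag := if acc < total then bag0 ++ [total - acc] else bag0
    flatPad seq_len word w2s bag

def align_original_txt_alt (ori_txt : List String) (seq_len : Int) :
    List (List String) × List (List Int) × List (List Int) :=
  let aligned := ori_txt.map (fun sample => flatAlign sample seq_len)
  (aligned.map (fun a => a.1), aligned.map (fun a => a.2.1), aligned.map (fun a => a.2.2))

-- ===== PRECONDITION & SPEC =====
-- Pre_ excludes negative seq_len (outside the function's natural domain: a sequence length);
-- there A returns accidental values of Python's negative-slice/negative-repeat semantics.
def Pre_align_original_txt (ori_txt : List String) (seq_len : Int) : Prop := 0 ≤ seq_len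
instance (ori_txt : List String) (seq_len : Int) : Decidable (Pre_align_original_txt ori_txt seq_len) := by unfold Pre_align_original_txt; infer_instance

def pvWitness_align_original_txt : List String × Int := (["a b<|||>c d e"], 4)

def Spec_align_original_txt (ori_txt : List String) (seq_len : Int) (out : List (List String) × List (List Int) × List (List Int)) : Prop := out = align_original_txt_alt ori_txt seq_len
instance (ori_txt : List String) (seq_len : Int) (out : List (List String) × List (List Int) × List (List Int)) : Decidable (Spec_align_original_txt ori_txt seq_len out) := by unfold Spec_align_original_txt; infer_instance

-- ===== CLAIM (what is proved, stated in full; the proofs are below) =====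
def Claim_equal_align_original_txt : Prop := ∀ (ori_txt : List String) (seq_len : Int), Dom_align_original_txt ori_txt seq_len → Pre_align_original_txt ori_txt seq_len → Spec_align_original_txt ori_txt seq_len (align_original_txt ori_txt seq_len)

-- ===== LEMMAS AND PROOFS =====

-- reference shapes of the per-sample result (proof-side only)
def bagOf : List (List String) → Int → List Int
  | [], _ => []
  | s :: rest, r =>
    if (s.length : Int) ≤ r then (s.length : Int) :: bagOf rest (r - s.length)
    else if 0 < r then [r] else []

def idxsOf : List (List String) → Int → Int → List Int
  | [], _, _ => []
  | s :: rest, r, k =>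
    if (s.length : Int) ≤ r then List.replicate s.length k ++ idxsOf rest (r - s.length) (k + 1)
    else List.replicate r.toNat k

lemma alignSentLoop_eq (seq : Int) (lines : List String) :
    ∀ (bag w2s : List Int) (word : List String) (idx cursor : Int),
    0 ≤ cursor → cursor ≤ seq →
    alignSentLoop seq lines bag w2s word idx cursor =
      (bag ++ bagOf (lines.map (fun l => (PySem.Str.split? l " ").getD [])) (seq - cursor),
       w2s ++ idxsOf (lines.map (fun l => (PySem.Str.split? l " ").getD [])) (seq - cursor) idx,
       word ++ (lines.map (fun l => (PySem.Str.split? l " ").getD [])).flatten.take (seq - cursor).toNat) := by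
  induction lines with
  | nil => intro bag w2s word idx cursor h0 h1; simp [alignSentLoop, bagOf, idxsOf]
  | cons l rest ih =>
    intro bag w2s word idx cursor h0 h1
    set s := (PySem.Str.split? l " ").getD [] with hs
    by_cases hfit : cursor + (s.length : Int) ≤ seq
    · rw [alignSentLoop]
      simp only [← hs, if_pos hfit]
      rw [ih _ _ _ _ _ (by omega) (by omega)]
      have hle : (s.length : Int) ≤ seq - cursor := by omega
      have harith : seq - (cursor + s.length) = seq - cursor - s.length := by ring
      have h2 : PySem.List.pyRepeat [idx] (s.length : Int) = List.replicate s.length idx := by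
        rw [PySem.List.pyRepeat_singleton]; simp
      have h3 : s.take (seq - cursor).toNat = s := List.take_of_length_le (by omega)
      have h4 : (seq - cursor).toNat - s.length = (seq - (cursor + s.length)).toNat := by omega
      simp only [List.map_cons, bagOf, idxsOf, List.flatten_cons, ← hs, if_pos hle,
        harith, h2, List.take_append, h3, h4]
      simp
    · rw [alignSentLoop]
      simp only [← hs, if_neg hfit]
      have hnle : ¬ (s.length : Int) ≤ seq - cursor := by omega
      by_cases hz : seq - cursor = 0
      · have hnpos : ¬ 0 < seq - cursor := by omega
        have hsne : s ≠ [] := List.ne_nil_of_length_pos (by omega)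
        simp [← hs, hz, bagOf, idxsOf, hsne]
      · have hpos : 0 < seq - cursor := by omega
        have h5 : (seq - cursor).toNat - s.length = 0 := by omega
        simp only [List.map_cons, bagOf, idxsOf, List.flatten_cons, ← hs, if_neg hnle,
          if_pos hpos, if_neg hz, PySem.List.pyRepeat_singleton,
          PySem.List.slice_to s hpos.le, List.take_append, h5, List.take_zero, List.append_nil]

lemma bagLoopB_eq (seq : Int) (sents : List (List String)) :
    ∀ (total : Int) (bag : List Int) (acc : Int),
    0 ≤ acc → acc ≤ seq → total = min (acc + (sents.flatten.length : Int)) seq →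
    (if (bagLoopB total sents bag acc).2 < total then
       (bagLoopB total sents bag acc).1 ++ [total - (bagLoopB total sents bag acc).2]
     else (bagLoopB total sents bag acc).1) = bag ++ bagOf sents (seq - acc) := by
  induction sents with
  | nil =>
    intro total bag acc h0 h1 ht
    have : total = acc := by simp at ht; omega
    simp [bagLoopB, bagOf, this]
  | cons s rest ih =>
    intro total bag acc h0 h1 ht
    simp only [List.flatten_cons, List.length_append] at ht
    push_cast at ht
    by_cases hfit : acc + (s.length : Int) ≤ seq
    · have hfit' : ¬ acc + (s.length : Int) > total := by omega
      rw [bagLoopB]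
      simp only [if_neg hfit']
      rw [ih total (bag ++ [(s.length : Int)]) (acc + (s.length : Int)) (by omega) hfit
        (by omega)]
      have hle : (s.length : Int) ≤ seq - acc := by omega
      have harith : seq - (acc + s.length) = seq - acc - s.length := by ring
      simp [bagOf, hle, harith]
    · have htot : total = seq := by omega
      subst htot
      have hfit' : acc + (s.length : Int) > total := by omega
      rw [bagLoopB]
      simp only [if_pos hfit']
      have hnle : ¬ (s.length : Int) ≤ total - acc := by omega
      by_cases hlt : acc < total
      · simp only [if_pos hlt]
        have hpos : 0 < total - acc := by omega
        simp [bagOf, hnle, hlt]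
      · simp only [if_neg hlt]
        have hnpos : ¬ 0 < total - acc := by omega
        simp [bagOf, hnle, hlt]

lemma flatIdx_length (sents : List (List String)) : ∀ (k : Int),
    ((PySem.List.enumerate sents k).flatMap (fun p => List.replicate p.2.length p.1)).length
      = sents.flatten.length := by
  induction sents with
  | nil => intro k; simp [PySem.List.enumerate]
  | cons s rest ih => intro k; simp [PySem.List.enumerate_cons, ih]

lemma flatIdx_take (sents : List (List String)) : ∀ (r k : Int), 0 ≤ r →
    ((PySem.List.enumerate sents k).flatMap (fun p => List.replicate p.2.length p.1)).take r.toNat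
      = idxsOf sents r k := by
  induction sents with
  | nil => intro r k h; simp [PySem.List.enumerate, idxsOf]
  | cons s rest ih =>
    intro r k h
    rw [PySem.List.enumerate_cons]
    simp only [List.flatMap_cons, List.take_append, List.length_replicate]
    by_cases hle : (s.length : Int) ≤ r
    · have h1 : (List.replicate s.length k).take r.toNat = List.replicate s.length k :=
        List.take_of_length_le (by simp; omega)
      have h2 : r.toNat - s.length = (r - s.length).toNat := by omega
      rw [h1, h2, ih _ _ (by omega)]
      simp [idxsOf, hle]
    · have h1 : (List.replicate s.length k).take r.toNat = List.replicate r.toNat k := by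
        rw [List.take_replicate]; congr 1; omega
      have h2 : r.toNat - s.length = 0 := by omega
      rw [h1, h2]
      simp [idxsOf, hle]

lemma take_min_length {α : Type} (xs : List α) (n : Nat) :
    xs.take (min xs.length n) = xs.take n := by
  rw [List.take_eq_take_iff]; omega

lemma pyGet_neg_one_concat {α : Type} (xs : List α) (x : α) :
    PySem.List.pyGet? (xs ++ [x]) (-1) = some x := by
  simp [PySem.List.pyGet?, PySem.List.pyIdx?]

lemma pyGet_neg_one_split {α : Type} (xs : List α) (x : α)
    (h : PySem.List.pyGet? xs (-1) = some x) : xs = xs.dropLast ++ [x] := by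
  have hx : xs ≠ [] := by rintro rfl; simp [PySem.List.pyGet?, PySem.List.pyIdx?] at h
  have hlen : 1 ≤ xs.length := List.length_pos_of_ne_nil hx
  have hg : xs.getLast? = some x := by
    rw [List.getLast?_eq_getElem?]
    simp only [PySem.List.pyGet?, PySem.List.pyIdx?] at h
    rw [if_neg (by omega), if_pos (by omega)] at h
    simpa using h
  exact Eq.symm (List.dropLast_append_getLast? x hg)

lemma alignPadLoop_eq (seq : Int) :
    ∀ (k : Nat) (word : List String) (w2s bag : List Int) (x b : Int),
    PySem.List.pyGet? w2s (-1) = some x → PySem.List.pyGet? bag (-1) = some b →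
    (seq - (word.length : Int)).toNat = k →
    alignPadLoop seq word w2s bag =
      (word ++ List.replicate k "<pad>", w2s ++ List.replicate k x,
       bag.dropLast ++ [b + (k : Int)]) := by
  intro k
  induction k with
  | zero =>
    intro word w2s bag x b hx hb hk
    rw [alignPadLoop, dif_neg (by omega)]
    have := pyGet_neg_one_split bag b hb
    simp only [List.replicate_zero, List.append_nil, Nat.cast_zero, add_zero]
    rw [← this]
  | succ k ih =>
    intro word w2s bag x b hx hb hk
    rw [alignPadLoop, dif_pos (by omega), hx, hb]
    show alignPadLoop seq (word ++ ["<pad>"]) (w2s ++ [x]) (bag.dropLast ++ [b + 1]) = _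
    rw [ih (word ++ ["<pad>"]) (w2s ++ [x]) (bag.dropLast ++ [b + 1]) x (b + 1)
      (pyGet_neg_one_concat _ _)
      (pyGet_neg_one_concat _ _)
      (by simp only [List.length_append, List.length_cons, List.length_nil]; omega)]
    rw [List.dropLast_concat]
    simp only [List.append_assoc, List.singleton_append, ← List.replicate_succ,
      Nat.cast_add, Nat.cast_one]
    have harith : b + 1 + (k : Int) = b + ((k : Int) + 1) := by ring
    rw [harith]

lemma alignPadLoop_eq_flatPad (seq : Int) (word : List String) (w2s bag : List Int) :
    alignPadLoop seq word w2s bag = flatPad seq word w2s bag := by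
  by_cases hlt : (word.length : Int) < seq
  · rcases hx : PySem.List.pyGet? w2s (-1) with _ | x <;>
      rcases hb : PySem.List.pyGet? bag (-1) with _ | b
    · rw [alignPadLoop, dif_pos hlt, flatPad]
      simp only [if_pos (show (0:Int) < seq - word.length by omega)]
      rw [hx, hb]
    · rw [alignPadLoop, dif_pos hlt, flatPad]
      simp only [if_pos (show (0:Int) < seq - word.length by omega)]
      rw [hx, hb]
    · rw [alignPadLoop, dif_pos hlt, flatPad]
      simp only [if_pos (show (0:Int) < seq - word.length by omega)]
      rw [hx, hb]
    · rw [alignPadLoop_eq seq (seq - word.length).toNat word w2s bag x b hx hb rfl, flatPad]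
      simp only [if_pos (show (0:Int) < seq - word.length by omega)]
      rw [hx, hb]
      simp only [PySem.List.pyRepeat_singleton]
      have : ((seq - (word.length:Int)).toNat : Int) = seq - word.length := by omega
      rw [this]
  · rw [alignPadLoop, dif_neg hlt, flatPad]
    simp only [if_neg (show ¬ (0:Int) < seq - word.length by omega)]

lemma sent_eq (sample : String) (seq : Int) (hseq : 0 ≤ seq) :
    align_ori_txt_sent sample seq = flatAlign sample seq := by
  simp only [align_ori_txt_sent, flatAlign]
  rw [alignSentLoop_eq seq _ [] [] [] 0 0 le_rfl hseq]
  simp only [List.nil_append, sub_zero]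
  set sents := (List.map (fun l => (PySem.Str.split? l " ").getD [])
    ((PySem.Str.split? sample "<|||>").getD [])) with hsents
  set flat := sents.flatten with hflat
  set fidx := List.flatMap (fun p => List.replicate p.2.length p.1)
    (PySem.List.enumerate sents) with hfidx
  set total : Int := min (flat.length : Int) seq with htotal
  have h0t : (0:Int) ≤ total := le_min (Int.natCast_nonneg _) hseq
  have hlen : fidx.length = flat.length := flatIdx_length sents 0
  have htN : total.toNat = min flat.length seq.toNat := by omega
  rw [PySem.List.slice_to flat h0t, PySem.List.slice_to fidx h0t, htN]
  rw [take_min_length flat seq.toNat]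
  rw [← hlen, take_min_length fidx seq.toNat]
  rw [hfidx, flatIdx_take sents seq 0 hseq]
  rw [bagLoopB_eq seq sents total [] 0 le_rfl hseq (by rw [htotal, hflat]; simp)]
  simp only [List.nil_append, sub_zero]
  exact alignPadLoop_eq_flatPad seq _ _ _

lemma alignOuter_eq (seq : Int) (ori : List String) :
    ∀ (ww : List (List String)) (ws lb : List (List Int)),
    alignOuter ori seq ww ws lb =
      (ww ++ ori.map (fun s => (align_ori_txt_sent s seq).1),
       ws ++ ori.map (fun s => (align_ori_txt_sent s seq).2.1),
       lb ++ ori.map (fun s => (align_ori_txt_sent s seq).2.2)) := by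
  induction ori with
  | nil => intro ww ws lb; simp [alignOuter]
  | cons s rest ih =>
    intro ww ws lb
    rw [alignOuter]
    rcases hs : align_ori_txt_sent s seq with ⟨w, i, l⟩
    simp only []
    rw [ih]
    simp [hs]

-- ===== VERDICT (by name: the statement is the Claim_ definition above) =====
theorem align_original_txt_spec : Claim_equal_align_original_txt := by
  intro ori seq _ hpre
  unfold Spec_align_original_txt align_original_txt align_original_txt_alt
  rw [alignOuter_eq]
  simp only [List.nil_append, List.map_map]
  refine congrArg₂ _ ?_ (congrArg₂ _ ?_ ?_) <;>
    (apply List.map_congr_left; intro s _; rw [sent_eq s seq hpre]; rfl)
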